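-- pv_equiv track=rewrite | github.com/AdamZhouSE/pythonHomework | Code/CodeRecords/2474/60772/249344.py | execute
-- ===== SOURCE A (Python) =====
-- class Stack:
--     def __init__(self):
--         self._elems = []
--
--     def is_empty(self):
--         return self._elems == []
--
--     def top(self):
--         if self._elems == []:
--             raise StackUnderflow("空栈异常：in Stack.top()")
--         return self._elems[-1]
--
--     def push(self,elem):
--         self._elems.append(elem)
--
--     def pop(self):
--         if self._elems == []:
--             raise StackUnderflow("空栈异常：in Stack.pop()")
--         return self._elems.pop()
--
-- def execute(N):
--     li = list(N)
--     li = li[:len(li)-1]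
--     stack = Stack()
--     count = 0
--     for item in li:
--         if item == '(':
--             stack.push(item)
--
--         if item == ')':
--             if not stack.is_empty():
--                 stack.pop()
--                 count += 1
--
--     return 2*count
-- ===== SOURCE B (Python) =====
-- def execute(N):
--     li = list(N)[:-1]
--     closes = li.count(')')
--     excess = 0
--     worst = 0
--     for ch in li:
--         if ch == ')':
--             excess += 1
--         elif ch == '(':
--             excess -= 1
--         if excess > worst:
--             worst = excess
--     return 2 * (closes - worst)
-- ===== Notes on version B (the rewrite author's own statement) =====
-- stated objective: alternative
-- what changed: Replaces the stack simulation by arithmetic: matched pairs = count of ')' minus the number of unmatched ')', computed as the maximum prefix excess of ')' over '(' (no stack, no depth tracking of matches).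
import Mathlib
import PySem

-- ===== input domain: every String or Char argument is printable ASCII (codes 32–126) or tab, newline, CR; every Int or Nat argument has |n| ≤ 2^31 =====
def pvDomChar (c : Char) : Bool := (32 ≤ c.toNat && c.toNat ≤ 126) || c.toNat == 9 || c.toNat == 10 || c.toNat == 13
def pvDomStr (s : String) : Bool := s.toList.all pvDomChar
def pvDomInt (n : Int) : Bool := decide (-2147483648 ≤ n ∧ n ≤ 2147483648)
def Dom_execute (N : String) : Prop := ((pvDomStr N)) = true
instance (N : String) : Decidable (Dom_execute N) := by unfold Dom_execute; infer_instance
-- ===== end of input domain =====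

-- B replaces A's stack simulation by arithmetic: matched pairs = #')' minus the maximum
-- prefix excess of ')' over '(' (the number of unmatched ')'); same O(n) cost.

-- ===== PORT A =====
-- the for-loop body: push on '(', then on ')' pop-and-count if the stack is nonempty
def executeStep (st : List Char × Int) (item : Char) : List Char × Int :=
  let st := if item = '(' then (st.1 ++ [item], st.2) else st
  if item = ')' then (if ¬ (st.1 = []) then (st.1.dropLast, st.2 + 1) else st) else st

def execute (N : String) : Int :=
  let li := N.toList
  let li := PySem.List.slice li none (some ((li.length : Int) - 1))
  let r := li.foldl executeStep ([], 0)
  2 * r.2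

-- ===== PORT B =====
-- loop body: update the running excess of ')' over '(', then the running maximum
def executeAltStep (st : Int × Int) (ch : Char) : Int × Int :=
  let e := if ch = ')' then st.1 + 1 else if ch = '(' then st.1 - 1 else st.1
  (e, if st.2 < e then e else st.2)

def execute_alt (N : String) : Int :=
  let li := N.toList.dropLast
  let closes : Int := PySem.List.count li ')'
  let r := li.foldl executeAltStep (0, 0)
  2 * (closes - r.2)

-- ===== PRECONDITION & SPEC =====
def Spec_execute (N : String) (out : Int) : Prop := out = execute_alt N
instance (N : String) (out : Int) : Decidable (Spec_execute N out) := by unfold Spec_execute; infer_instance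

-- ===== CLAIM (what is proved, stated in full; the proofs are below) =====
def Claim_equal_execute : Prop := ∀ (N : String), Dom_execute N → Spec_execute N (execute N)

-- ===== LEMMAS AND PROOFS =====

-- A's slice li[:len(li)-1] is dropLast (also when li = [], where len-1 = -1)
lemma slice_pred_eq_dropLast (li : List Char) :
    PySem.List.slice li none (some ((li.length : Int) - 1)) = li.dropLast := by
  cases li with
  | nil => simpa using PySem.List.slice_to_neg_one ([] : List Char)
  | cons a l =>
      have h : ((a :: l).length : Int) - 1 = ((l.length : Nat) : Int) := by simp
      rw [h, PySem.List.slice_to_natCast]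
      simp [List.dropLast_eq_take]

-- loop invariant: if B's excess e equals its worst w minus A's stack height, then after the
-- loop the same relation holds and c + w grows exactly by the number of ')' consumed.
lemma loop_inv (li : List Char) : ∀ (s : List Char) (c e w : Int),
    e = w - (s.length : Int) →
    (li.foldl executeAltStep (e, w)).1
        = (li.foldl executeAltStep (e, w)).2
          - (((li.foldl executeStep (s, c)).1.length : Int))
    ∧ (li.foldl executeStep (s, c)).2 + (li.foldl executeAltStep (e, w)).2
        = c + w + (li.count ')' : Int) := by
  induction li with
  | nil => intro s c e w he; simpa using he
  | cons ch l ih =>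
      intro s c e w he
      simp only [List.foldl_cons]
      by_cases hq : ch = ')'
      · by_cases hs : s = []
        · -- empty stack: A ignores the ')', B's worst increases to e+1
          have hA : executeStep (s, c) ch = (s, c) := by
            simp [executeStep, hs, hq]
          have hB : executeAltStep (e, w) ch = (e + 1, w + 1) := by
            have : e = w := by simp [hs] at he; exact he
            simp [executeAltStep, hq, this]
          rw [hA, hB]
          have he' : e + 1 = (w + 1) - (s.length : Int) := by subst hs; simp at he ⊢; omega
          have := ih s c (e + 1) (w + 1) he'
          refine ⟨this.1, ?_⟩
          have h2 := this.2
          simp [hq]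
          omega
        · -- nonempty stack: A pops and counts, B's excess rises but stays ≤ w
          have hA : executeStep (s, c) ch = (s.dropLast, c + 1) := by
            simp [executeStep, hs, hq]
          have hlen : 1 ≤ (s.length : Int) := by
            have : 0 < s.length := List.length_pos_iff.mpr hs
            omega
          have hB : executeAltStep (e, w) ch = (e + 1, w) := by
            have : ¬ w < e + 1 := by omega
            simp [executeAltStep, hq, this]
          rw [hA, hB]
          have he' : e + 1 = w - ((s.dropLast.length : Nat) : Int) := by
            have hd : s.dropLast.length = s.length - 1 := by simp
            omega
          have := ih s.dropLast (c + 1) (e + 1) w he'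
          refine ⟨this.1, ?_⟩
          have h2 := this.2
          simp [hq]
          omega
      · by_cases hp : ch = '('
        · -- '(': A pushes, B's excess drops (worst unchanged)
          have hA : executeStep (s, c) ch = (s ++ [ch], c) := by
            simp [executeStep, hp]
          have hB : executeAltStep (e, w) ch = (e - 1, w) := by
            have hle : e ≤ w := by
              have : (0:Int) ≤ (s.length : Int) := by positivity
              omega
            have : ¬ w < e - 1 := by omega
            simp [executeAltStep, hp, this]
          rw [hA, hB]
          have he' : e - 1 = w - (((s ++ [ch]).length : Nat) : Int) := by
            simp; omega
          have := ih (s ++ [ch]) c (e - 1) w he'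
          refine ⟨this.1, ?_⟩
          have h2 := this.2
          simp [hq]
          omega
        · -- other characters: both states unchanged
          have hA : executeStep (s, c) ch = (s, c) := by
            simp [executeStep, hp, hq]
          have hB : executeAltStep (e, w) ch = (e, w) := by
            have : ¬ w < e := by
              have : (0:Int) ≤ (s.length : Int) := by positivity
              omega
            simp [executeAltStep, hp, hq, this]
          rw [hA, hB]
          have := ih s c e w he
          refine ⟨this.1, ?_⟩
          have h2 := this.2
          simp [hq]
          omega

-- ===== VERDICT (by name: the statement is the Claim_ definition above) =====
theorem execute_spec : Claim_equal_execute := by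
  intro N _
  unfold Spec_execute
  simp only [execute, execute_alt, slice_pred_eq_dropLast]
  have h := (loop_inv (N.toList.dropLast) [] 0 0 0 (by simp)).2
  rw [PySem.List.count_eq]
  omega
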